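-- pv_equiv track=rewrite | github.com/FlorentFlament/m | tools/asmlib.py | lst2asm
-- ===== SOURCE A (Python) =====
-- def lst2asm(lst, perline=8):
--     res = []
--     for i,v in enumerate(lst):
--         if i%perline == 0:
--             if i != 0:
--                 res.append('\n')
--             res.append('\tdc.b ')
--         else:
--             res.append(', ')
--         res.append("${:02x}".format(v))
--     return ''.join(res)
-- ===== SOURCE B (Python) =====
-- def lst2asm(lst, perline=8):
--     chunks = [lst[i:i + perline] for i in range(0, len(lst), perline)]
--     return '\n'.join('\tdc.b ' + ', '.join('${:02x}'.format(v) for v in chunk)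
--                      for chunk in chunks)
-- ===== Notes on version B (the rewrite author's own statement) =====
-- stated objective: idiomatic
-- what changed: Replaces the single interleaved loop that switches on i % perline to emit separator fragments with a two-stage chunk-then-join decomposition: slice the list into perline-sized chunks, format each chunk with ', '.join, and '\n'.join the lines.
-- outside the precondition, e.g. on lst2asm([1, 2, 3], -2): A returns '\tdc.b $01, $02\n\tdc.b $03', B returns ''; on lst2asm([1], 0): A raises ZeroDivisionError, B raises ValueError
import Mathlib
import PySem

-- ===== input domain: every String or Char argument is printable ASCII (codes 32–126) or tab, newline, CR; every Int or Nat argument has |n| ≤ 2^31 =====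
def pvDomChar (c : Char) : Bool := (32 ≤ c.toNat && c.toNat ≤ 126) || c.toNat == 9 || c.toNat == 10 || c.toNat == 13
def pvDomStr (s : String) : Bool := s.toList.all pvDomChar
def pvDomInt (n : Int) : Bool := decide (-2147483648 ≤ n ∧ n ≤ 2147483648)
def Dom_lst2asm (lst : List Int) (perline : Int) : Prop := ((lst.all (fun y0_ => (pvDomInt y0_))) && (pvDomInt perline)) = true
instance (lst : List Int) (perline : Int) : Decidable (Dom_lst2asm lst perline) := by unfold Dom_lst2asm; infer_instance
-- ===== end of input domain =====

-- B replaces A's single interleaved loop (switching on i % perline to emit separators)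
-- by an idiomatic chunk-then-join decomposition; equivalence of the return value is proved for perline ≥ 1.

-- shared library-level helper: the exact value of Python's '{:02x}'.format(v)
-- (lowercase hex digits of |v|, zero-filled to total width 2 with the sign in front of the fill)
def hex02 (v : Int) : String :=
  if v < 0 then
    String.ofList ('-' :: (List.replicate (1 - (Nat.toDigits 16 v.natAbs).length) '0' ++ Nat.toDigits 16 v.natAbs))
  else
    String.ofList (List.replicate (2 - (Nat.toDigits 16 v.natAbs).length) '0' ++ Nat.toDigits 16 v.natAbs)

-- ===== PORT A =====
-- the 'for i,v in enumerate(lst)' loop, state = res (list of string fragments)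
def lst2asmGo (perline : Int) (xs : List (Int × Int)) (res : List String) : List String :=
  match xs with
  | [] => res
  | (i, v) :: rest =>
      lst2asmGo perline rest
        ((if PySem.Int.mod i perline = 0 then
            (if i ≠ 0 then res ++ ["\n"] else res) ++ ["\tdc.b "]
          else res ++ [", "]) ++ ["$" ++ hex02 v])

def lst2asm (lst : List Int) (perline : Int) : String :=
  PySem.Str.join "" (lst2asmGo perline (PySem.List.enumerate lst) [])

-- ===== PORT B =====
def lst2asm_alt (lst : List Int) (perline : Int) : String :=
  let chunks := (PySem.List.pyRange 0 (PySem.List.len lst) perline).map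
      (fun i => PySem.List.slice lst (some i) (some (i + perline)))
  PySem.Str.join "\n" (chunks.map (fun c =>
    "\tdc.b " ++ PySem.Str.join ", " (c.map (fun v => "$" ++ hex02 v))))

-- ===== PRECONDITION & SPEC =====
-- Pre_ excludes perline ≤ 0: at perline = 0 A raises ZeroDivisionError (and B ValueError from range);
-- for negative perline A's acceptance (i % perline == 0 still fires at multiples) is an accident of
-- Python's modulo on a nonsensical line width, and B's empty chunking there is equally defensible.
def Pre_lst2asm (lst : List Int) (perline : Int) : Prop := 1 ≤ perline
instance (lst : List Int) (perline : Int) : Decidable (Pre_lst2asm lst perline) := by unfold Pre_lst2asm; infer_instance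
def pvWitness_lst2asm : List Int × Int := ([1, 2, 3], 2)

def Spec_lst2asm (lst : List Int) (perline : Int) (out : String) : Prop := out = lst2asm_alt lst perline
instance (lst : List Int) (perline : Int) (out : String) : Decidable (Spec_lst2asm lst perline out) := by unfold Spec_lst2asm; infer_instance

-- ===== CLAIM (what is proved, stated in full; the proofs are below) =====
def Claim_equal_lst2asm : Prop := ∀ (lst : List Int) (perline : Int), Dom_lst2asm lst perline → Pre_lst2asm lst perline → Spec_lst2asm lst perline (lst2asm lst perline)

-- ===== LEMMAS AND PROOFS =====

-- reference shape shared by both equivalence directions: B's recursion made explicit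
def bline (p : Nat) (x : Int) (xs : List Int) : String :=
  "\tdc.b " ++ PySem.Str.join ", " ((x :: xs.take (p - 1)).map (fun v => "$" ++ hex02 v))

def bstr (p : Nat) : List Int → String
  | [] => ""
  | x :: xs =>
      bline p x xs ++ (if xs.drop (p - 1) = [] then "" else "\n" ++ bstr p (xs.drop (p - 1)))
termination_by xs => xs.length
decreasing_by simp

-- --- String-level join lemmas ---
theorem join_nil_str (sep : String) : PySem.Str.join sep [] = "" := by
  simp [PySem.Str.join, PySem.Chars.join, List.intercalate]

theorem join_singleton_str (sep a : String) : PySem.Str.join sep [a] = a := by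
  simp [PySem.Str.join, PySem.Chars.join_singleton]

theorem join_cons2_str (sep a b : String) (l : List String) :
    PySem.Str.join sep (a :: b :: l) = a ++ sep ++ PySem.Str.join sep (b :: l) := by
  simp [PySem.Str.join, PySem.Chars.join_cons_cons, String.append_assoc]

theorem join_empty_cons (a : String) (l : List String) :
    PySem.Str.join "" (a :: l) = a ++ PySem.Str.join "" l := by
  cases l with
  | nil => simp [join_singleton_str, join_nil_str]
  | cons b r => rw [join_cons2_str]; simp

theorem join_empty_append (l1 l2 : List String) :
    PySem.Str.join "" (l1 ++ l2) = PySem.Str.join "" l1 ++ PySem.Str.join "" l2 := by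
  induction l1 with
  | nil => simp [join_nil_str]
  | cons a l ih => simp [join_empty_cons, ih, String.append_assoc]

-- --- A-side loop lemmas ---
theorem go_append (p : Int) (l1 l2 : List (Int × Int)) (res : List String) :
    lst2asmGo p (l1 ++ l2) res = lst2asmGo p l2 (lst2asmGo p l1 res) := by
  induction l1 generalizing res with
  | nil => simp [lst2asmGo]
  | cons h t ih => obtain ⟨i, v⟩ := h; simp only [List.cons_append, lst2asmGo]; exact ih _

theorem go_res (p : Int) (l : List (Int × Int)) (res : List String) :
    lst2asmGo p l res = res ++ lst2asmGo p l [] := by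
  induction l generalizing res with
  | nil => simp [lst2asmGo]
  | cons h t ih =>
      obtain ⟨i, v⟩ := h
      simp only [lst2asmGo]
      rw [ih, @ih ((if PySem.Int.mod i p = 0 then
            (if i ≠ 0 then [] ++ ["\n"] else ([] : List String)) ++ ["\tdc.b "]
          else [] ++ [", "]) ++ ["$" ++ hex02 v])]
      split_ifs <;> simp

-- within a chunk (index j with 1 ≤ j, j + |ys| ≤ p): every element emits ', ' then its hex
theorem go_inner (p : Nat) (hp : 1 ≤ p) (ys : List Int) (m j : Nat) (hj : 1 ≤ j)
    (hle : j + ys.length ≤ p) :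
    lst2asmGo (p : Int) (PySem.List.enumerate ys ((p : Int) * m + j)) [] =
      ys.flatMap (fun v => [", ", "$" ++ hex02 v]) := by
  induction ys generalizing j with
  | nil => simp [PySem.List.enumerate_nil, lst2asmGo]
  | cons v ys ih =>
      rw [PySem.List.enumerate_cons]
      simp only [lst2asmGo]
      have hjp : ((j : Nat) : Int) < (p : Int) := by
        simp only [List.length_cons] at hle; exact_mod_cast (by omega : j < p)
      have hmod : PySem.Int.mod ((p : Int) * m + j) p = (j : Int) := by
        have h1 : ((p : Int) * m + j) = (j : Int) + (p : Int) * m := by ring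
        simp only [PySem.Int.mod]
        rw [Int.fmod_eq_emod_of_nonneg _ (by positivity), h1, Int.add_mul_emod_self_left,
          Int.emod_eq_of_lt (by positivity) hjp]
      rw [hmod, if_neg (by exact_mod_cast (by omega : ¬ (j : Int) = 0))]
      rw [go_res]
      have hcast : (p : Int) * m + j + 1 = (p : Int) * m + ((j + 1 : Nat) : Int) := by
        push_cast; ring
      rw [hcast, ih (j + 1) (by omega) (by simp only [List.length_cons] at hle; omega)]
      simp

-- the chunk line as a joined string
theorem line_join (t : List Int) (x : Int) :
    PySem.Str.join "" (("$" ++ hex02 x) :: t.flatMap (fun v => [", ", "$" ++ hex02 v])) =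
      PySem.Str.join ", " ((x :: t).map (fun v => "$" ++ hex02 v)) := by
  induction t generalizing x with
  | nil => simp [join_singleton_str]
  | cons y t ih =>
      simp only [List.flatMap_cons, List.map_cons, List.cons_append, List.nil_append]
      rw [join_empty_cons, join_empty_cons]
      have : PySem.Str.join "" (("$" ++ hex02 y) :: t.flatMap (fun v => [", ", "$" ++ hex02 v])) =
          PySem.Str.join ", " (("$" ++ hex02 y) :: t.map (fun v => "$" ++ hex02 v)) := by
        simpa using ih y
      rw [this, join_cons2_str]
      simp [String.append_assoc]

-- chunks at offset p*m (m ≥ 1): each is preceded by a newline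
theorem go_chunks (p : Nat) (hp : 1 ≤ p) :
    ∀ (n : Nat) (xs : List Int) (m : Nat), xs.length ≤ n → 1 ≤ m →
      PySem.Str.join "" (lst2asmGo (p : Int) (PySem.List.enumerate xs ((p : Int) * m)) []) =
        (if xs = [] then "" else "\n" ++ bstr p xs) := by
  intro n
  induction n with
  | zero =>
      intro xs m hlen _
      have hx : xs = [] := List.length_eq_zero_iff.mp (Nat.le_zero.mp hlen)
      subst hx
      simp [PySem.List.enumerate_nil, lst2asmGo, join_nil_str]
  | succ n ih =>
      intro xs m hlen hm
      cases xs with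
      | nil => simp [PySem.List.enumerate_nil, lst2asmGo, join_nil_str]
      | cons x rest =>
          have hsplit : rest.take (p - 1) ++ rest.drop (p - 1) = rest := List.take_append_drop _ _
          have hmul0 : PySem.Int.mod ((p : Int) * m) p = 0 := by
            simp only [PySem.Int.mod]
            rw [Int.fmod_eq_emod_of_nonneg _ (by positivity), Int.mul_emod_right]
          have hpm : ((p : Int) * m) ≠ 0 := by
            have h1 : 0 < p * m := Nat.mul_pos (by omega) (by omega)
            have h2 : ((p * m : Nat) : Int) = (p : Int) * m := by push_cast; ring
            omega
          conv_lhs => rw [← hsplit]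
          rw [show (x :: (rest.take (p - 1) ++ rest.drop (p - 1))) =
                [x] ++ (rest.take (p - 1) ++ rest.drop (p - 1)) from rfl]
          rw [PySem.List.enumerate_append, PySem.List.enumerate_append]
          rw [go_append, go_append]
          simp only [PySem.List.enumerate_cons, PySem.List.enumerate_nil, lst2asmGo]
          rw [if_pos hmul0, if_pos hpm]
          have hlen1 : ((([x] : List Int).length : Int)) = 1 := by simp
          have htle : (rest.take (p - 1)).length ≤ p - 1 := by
            simp only [List.length_take]; omega
          have hinner : lst2asmGo (p : Int)
              (PySem.List.enumerate (rest.take (p - 1)) ((p : Int) * m + ([x] : List Int).length)) [] =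
              (rest.take (p - 1)).flatMap (fun v => [", ", "$" ++ hex02 v]) := by
            have : ((p : Int) * m + ([x] : List Int).length) = (p : Int) * m + ((1 : Nat) : Int) := by
              simp
            rw [this]
            exact go_inner p hp _ m 1 (by omega) (by omega)
          rw [go_res _ (PySem.List.enumerate (rest.take (p - 1)) _) _, hinner]
          rw [go_res, join_empty_append]
          by_cases hd : rest.drop (p - 1) = []
          · rw [hd]
            simp only [PySem.List.enumerate_nil, lst2asmGo, join_nil_str]
            simp only [List.nil_append, List.cons_append]
            rw [join_empty_cons, join_empty_cons, line_join]
            rw [if_neg (by simp), bstr]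
            unfold bline
            rw [if_pos hd]
            simp
          · have htlen : (rest.take (p - 1)).length = p - 1 := by
              have : p - 1 < rest.length := by
                by_contra hcon
                exact hd (List.drop_eq_nil_of_le (by omega))
              simp [List.length_take, Nat.min_eq_left (by omega : p - 1 ≤ rest.length)]
            have hoff : (p : Int) * m + ([x] : List Int).length + ((rest.take (p - 1)).length : Int) =
                (p : Int) * (m + 1 : Nat) := by
              rw [htlen]
              simp only [List.length_cons, List.length_nil]
              push_cast [Nat.cast_sub (by omega : 1 ≤ p)]
              ring
            rw [hoff, ih (rest.drop (p - 1)) (m + 1)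
                  (by simp only [List.length_drop]; simp only [List.length_cons] at hlen; omega) (by omega),
                if_neg hd]
            simp only [List.nil_append, List.cons_append]
            rw [join_empty_cons, join_empty_cons, line_join]
            rw [if_neg (by simp), bstr]
            unfold bline
            rw [if_neg hd]
            simp [String.append_assoc]

theorem a_eq_bstr (p : Nat) (hp : 1 ≤ p) (lst : List Int) :
    lst2asm lst (p : Int) = bstr p lst := by
  cases lst with
  | nil => simp [lst2asm, PySem.List.enumerate_nil, lst2asmGo, join_nil_str, bstr]
  | cons x rest =>
      unfold lst2asm
      have hsplit : rest.take (p - 1) ++ rest.drop (p - 1) = rest := List.take_append_drop _ _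
      have hmul0 : PySem.Int.mod 0 (p : Int) = 0 := by
        simp [PySem.Int.mod]
      conv_lhs => rw [← hsplit]
      rw [show (x :: (rest.take (p - 1) ++ rest.drop (p - 1))) =
            [x] ++ (rest.take (p - 1) ++ rest.drop (p - 1)) from rfl]
      rw [PySem.List.enumerate_append, PySem.List.enumerate_append]
      rw [go_append, go_append]
      simp only [PySem.List.enumerate_cons, PySem.List.enumerate_nil, lst2asmGo]
      rw [if_pos hmul0, if_neg (by simp)]
      have hinner : lst2asmGo (p : Int)
          (PySem.List.enumerate (rest.take (p - 1)) ((0 : Int) + ([x] : List Int).length)) [] =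
          (rest.take (p - 1)).flatMap (fun v => [", ", "$" ++ hex02 v]) := by
        have : ((0 : Int) + ([x] : List Int).length) = (p : Int) * ((0 : Nat) : Int) + ((1 : Nat) : Int) := by
          simp
        rw [this]
        exact go_inner p hp _ 0 1 (by omega) (by have := List.length_take_le (p - 1) rest; omega)
      rw [go_res _ (PySem.List.enumerate (rest.take (p - 1)) _) _, hinner]
      rw [go_res, join_empty_append]
      by_cases hd : rest.drop (p - 1) = []
      · rw [hd]
        simp only [PySem.List.enumerate_nil, lst2asmGo, join_nil_str]
        simp only [List.nil_append, List.cons_append]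
        rw [join_empty_cons, line_join]
        rw [bstr]
        unfold bline
        rw [if_pos hd]
      · have htlen : (rest.take (p - 1)).length = p - 1 := by
          have : p - 1 < rest.length := by
            by_contra hcon
            exact hd (List.drop_eq_nil_of_le (by omega))
          simp [List.length_take, Nat.min_eq_left (by omega : p - 1 ≤ rest.length)]
        have hoff : (0 : Int) + ([x] : List Int).length + ((rest.take (p - 1)).length : Int) =
            (p : Int) * (1 : Nat) := by
          rw [htlen]
          simp only [List.length_cons, List.length_nil]
          push_cast [Nat.cast_sub (by omega : 1 ≤ p)]
          ring
        rw [hoff, go_chunks p hp (rest.drop (p - 1)).length (rest.drop (p - 1)) 1 (le_refl _) (by omega),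
            if_neg hd]
        simp only [List.nil_append, List.cons_append]
        rw [join_empty_cons, line_join]
        rw [bstr]
        unfold bline
        rw [if_neg hd]

-- --- B-side lemmas ---
theorem pyRange_pos_cons (n p : Int) (hp : 1 ≤ p) (hn : 0 < n) :
    PySem.List.pyRange 0 n p = 0 :: (PySem.List.pyRange 0 (n - p) p).map (· + p) := by
  rw [PySem.List.pyRange_of_pos 0 n (by omega), PySem.List.pyRange_of_pos 0 (n - p) (by omega)]
  have h1 : (n - 0 + p - 1) / p = (n - 1) / p + 1 := by
    rw [show n - 0 + p - 1 = (n - 1) + 1 * p from by ring, Int.add_mul_ediv_right _ _ (by omega)]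
  have h2 : 0 ≤ (n - 1) / p := Int.ediv_nonneg (by omega) (by omega)
  have hcount : ((n - 0 + p - 1) / p).toNat =
      (if 0 < n - p then ((n - p - 0 + p - 1) / p).toNat else 0) + 1 := by
    split_ifs with hnp
    · have h3 : n - p - 0 + p - 1 = n - 1 := by ring
      rw [h3, h1]
      omega
    · have h4 : (n - 1) / p = 0 := Int.ediv_eq_zero_of_lt (by omega) (by omega)
      rw [h1, h4]
      omega
  rw [if_pos hn, hcount, List.range_succ_eq_map]
  simp only [List.map_cons, List.map_map]
  congr 1
  · simp
  · apply List.map_congr_left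
    intro k _
    simp [Function.comp]
    ring

theorem join_cons_ne (sep a : String) (l : List String) (h : l ≠ []) :
    PySem.Str.join sep (a :: l) = a ++ sep ++ PySem.Str.join sep l := by
  cases l with
  | nil => exact absurd rfl h
  | cons b r => exact join_cons2_str sep a b r

theorem slice_shift (x : Int) (rest : List Int) (p : Nat) (hp : 1 ≤ p) (i : Int) (hi : 0 ≤ i) :
    PySem.List.slice (x :: rest) (some (i + (p : Int))) (some (i + (p : Int) + (p : Int))) =
      PySem.List.slice (rest.drop (p - 1)) (some i) (some (i + (p : Int))) := by
  rw [PySem.List.slice_toNat _ (by omega) (by omega), PySem.List.slice_toNat _ hi (by omega)]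
  have h2 : (i + (p : Int) + (p : Int)).toNat - (i + (p : Int)).toNat = p := by omega
  have h3 : (i + (p : Int)).toNat - i.toNat = p := by omega
  rw [h2, h3]
  congr 1
  rw [show (i + (p : Int)).toNat = i.toNat + p from by omega]
  rw [show i.toNat + p = (i.toNat + (p - 1)) + 1 from by omega, List.drop_succ_cons,
      show i.toNat + (p - 1) = (p - 1) + i.toNat from by omega, ← List.drop_drop]

theorem b_eq_bstr (p : Nat) (hp : 1 ≤ p) :
    ∀ (n : Nat) (lst : List Int), lst.length ≤ n → lst2asm_alt lst (p : Int) = bstr p lst := by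
  intro n
  induction n with
  | zero =>
      intro lst hlen
      have hx : lst = [] := List.length_eq_zero_iff.mp (Nat.le_zero.mp hlen)
      subst hx
      simp [lst2asm_alt, PySem.List.pyRange_of_pos 0 _ (by omega : (0 : Int) < (p : Int)),
        join_nil_str, bstr]
  | succ n ih =>
      intro lst hlen
      cases lst with
      | nil =>
          simp [lst2asm_alt, PySem.List.pyRange_of_pos 0 _ (by omega : (0 : Int) < (p : Int)),
            join_nil_str, bstr]
      | cons x rest =>
          unfold lst2asm_alt
          simp only [PySem.List.len_eq]
          rw [pyRange_pos_cons _ _ (by exact_mod_cast hp) (by exact_mod_cast Nat.succ_pos rest.length)]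
          simp only [List.map_cons, List.map_map]
          have hchunk0 : PySem.List.slice (x :: rest) (some 0) (some (0 + (p : Int))) =
              x :: rest.take (p - 1) := by
            rw [zero_add, PySem.List.slice_zero_start, PySem.List.slice_to_natCast]
            have h : List.take (p - 1 + 1) (x :: rest) = x :: List.take (p - 1) rest :=
              List.take_succ_cons
            rw [show p - 1 + 1 = p from by omega] at h
            exact h
          rw [hchunk0]
          by_cases hd : rest.drop (p - 1) = []
          · have hle2 : ((rest.length : Int) + 1) - (p : Int) ≤ 0 := by
              have h : rest.length ≤ p - 1 := by
                have h2 := hd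
                rwa [List.drop_eq_nil_iff] at h2
              omega
            have hrange0 : PySem.List.pyRange 0 (((x :: rest).length : Int) - (p : Int)) (p : Int) = [] := by
              rw [PySem.List.pyRange_of_pos 0 _ (by omega : (0 : Int) < (p : Int))]
              rw [if_neg (by simp; omega)]
              simp
            rw [hrange0]
            simp only [List.map_nil]
            rw [join_singleton_str, bstr, bline, if_pos hd]
            simp
          · have hdl : p - 1 < rest.length := by
              by_contra hcon
              exact hd (List.drop_eq_nil_of_le (by omega))
            have hneq : ((x :: rest).length : Int) - (p : Int) = ((rest.drop (p - 1)).length : Int) := by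
              simp only [List.length_cons, List.length_drop]
              push_cast [Nat.cast_sub (by omega : p - 1 ≤ rest.length), Nat.cast_sub (by omega : 1 ≤ p)]
              ring
            rw [hneq]
            have hihd := ih (rest.drop (p - 1)) (by
              have h1 : rest.length ≤ n := by simpa using hlen
              simp only [List.length_drop]
              omega)
            have htail : ∀ (R : List Int) (hR : ∀ i ∈ R, 0 ≤ i),
                R.map ((fun c => "\tdc.b " ++ PySem.Str.join ", " (c.map (fun v => "$" ++ hex02 v))) ∘
                    (fun i => PySem.List.slice (x :: rest) (some i) (some (i + (p : Int)))) ∘ (· + (p : Int))) =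
                R.map ((fun c => "\tdc.b " ++ PySem.Str.join ", " (c.map (fun v => "$" ++ hex02 v))) ∘
                    (fun i => PySem.List.slice (rest.drop (p - 1)) (some i) (some (i + (p : Int))))) := by
              intro R hR
              apply List.map_congr_left
              intro i hi
              simp only [Function.comp]
              rw [slice_shift x rest p hp i (hR i hi)]
            rw [htail _ (fun i hi => by
              have := (PySem.List.mem_pyRange_iff_of_pos (by omega : (0 : Int) < (p : Int)) i).mp hi
              omega)]
            have hL : (PySem.List.pyRange 0 ((rest.drop (p - 1)).length : Int) (p : Int)).map
                ((fun c => "\tdc.b " ++ PySem.Str.join ", " (c.map (fun v => "$" ++ hex02 v))) ∘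
                    (fun i => PySem.List.slice (rest.drop (p - 1)) (some i) (some (i + (p : Int))))) ≠ ([] : List String) := by
              rw [pyRange_pos_cons _ _ (by exact_mod_cast hp)
                (by exact_mod_cast (by simp only [List.length_drop]; omega : 0 < (rest.drop (p - 1)).length))]
              simp
            rw [join_cons_ne _ _ _ hL]
            have halt : PySem.Str.join "\n"
                ((PySem.List.pyRange 0 ((rest.drop (p - 1)).length : Int) (p : Int)).map
                  ((fun c => "\tdc.b " ++ PySem.Str.join ", " (c.map (fun v => "$" ++ hex02 v))) ∘
                      (fun i => PySem.List.slice (rest.drop (p - 1)) (some i) (some (i + (p : Int)))))) =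
                lst2asm_alt (rest.drop (p - 1)) (p : Int) := by
              unfold lst2asm_alt
              simp only [PySem.List.len_eq, List.map_map]
            rw [halt, hihd, bstr, bline, if_neg hd]
            simp [String.append_assoc]


-- ===== VERDICT (by name: the statement is the Claim_ definition above) =====
theorem lst2asm_spec : Claim_equal_lst2asm := by
  intro lst perline _hdom hpre
  unfold Spec_lst2asm
  have hp : 1 ≤ perline := hpre
  have h := Int.toNat_of_nonneg (le_trans (by norm_num) hp)
  rw [← h, a_eq_bstr perline.toNat (by omega) lst,
      b_eq_bstr perline.toNat (by omega) lst.length lst (le_refl _)]
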